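-- pv_equiv track=rewrite | github.com/tu2gin/algorithms-templates | python/sprint1_nonfinals/l.py | get_excessive_letter
-- ===== SOURCE A (Python) =====
-- def get_excessive_letter(shorter: str, longer: str) -> str:
--     list_1 = list(shorter)
--     list_2 = list(longer)
--     for i in range(0,len(list_1)):
--         if list_1[i] in list_2:
--             list_2.remove(str(list_1[i]))
--     result = ''.join(list_2)
--     return result
-- ===== SOURCE B (Python) =====
-- def get_excessive_letter(shorter: str, longer: str) -> str:
--     budget = {}
--     for c in shorter:
--         budget[c] = budget.get(c, 0) + 1
--     out = []
--     for c in longer: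
--         k = budget.get(c, 0)
--         if k > 0:
--             budget[c] = k - 1
--         else:
--             out.append(c)
--     return ''.join(out)
-- ===== Notes on version B (the rewrite author's own statement) =====
-- stated objective: faster
-- what changed: Replaced the per-character membership test and list.remove scans with a character-count budget built in one pass over shorter, then a single pass over longer that skips each char while its budget lasts.
import Mathlib
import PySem

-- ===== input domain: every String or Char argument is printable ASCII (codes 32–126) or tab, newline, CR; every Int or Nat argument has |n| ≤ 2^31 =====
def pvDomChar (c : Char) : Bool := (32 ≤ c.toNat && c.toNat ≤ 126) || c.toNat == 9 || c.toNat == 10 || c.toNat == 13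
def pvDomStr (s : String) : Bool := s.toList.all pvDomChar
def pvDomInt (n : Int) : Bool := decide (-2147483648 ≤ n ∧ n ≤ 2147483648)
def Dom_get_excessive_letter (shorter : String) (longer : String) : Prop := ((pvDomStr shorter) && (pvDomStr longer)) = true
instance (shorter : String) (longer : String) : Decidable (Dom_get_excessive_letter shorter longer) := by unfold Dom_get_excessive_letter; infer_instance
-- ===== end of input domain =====

-- B replaces A's quadratic membership-test-and-remove loop by a character-count budget
-- and a single skip-while-budget pass over `longer` (objective: faster, asymptotic).


-- ===== PORT A =====
def get_excessive_letter (shorter : String) (longer : String) : String :=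
  let list1 := shorter.toList
  let list2 := longer.toList
  -- for i in range(0, len(list_1)): if list_1[i] in list_2: list_2.remove(list_1[i])
  let list2 := list1.foldl (fun l2 c =>
    if c ∈ l2 then (PySem.List.remove? l2 c).getD l2 else l2) list2
  String.mk list2

-- ===== PORT B =====
def get_excessive_letter_alt (shorter : String) (longer : String) : String :=
  -- budget[c] = budget.get(c, 0) + 1
  let budget : PySem.Dict Char Int :=
    shorter.toList.foldl (fun d c => d.insert c (d.getD c 0 + 1)) PySem.Dict.empty
  -- one pass over longer: skip while budget lasts, otherwise append
  let out := (longer.toList.foldl (fun (st : PySem.Dict Char Int × List Char) c =>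
      let k := st.1.getD c 0
      if k > 0 then (st.1.insert c (k - 1), st.2) else (st.1, st.2 ++ [c]))
    (budget, [])).2
  String.mk out

-- ===== PRECONDITION & SPEC =====
def Spec_get_excessive_letter (shorter : String) (longer : String) (out : String) : Prop := out = get_excessive_letter_alt shorter longer
instance (shorter : String) (longer : String) (out : String) : Decidable (Spec_get_excessive_letter shorter longer out) := by unfold Spec_get_excessive_letter; infer_instance

-- ===== CLAIM (what is proved, stated in full; the proofs are below) =====
def Claim_equal_get_excessive_letter : Prop := ∀ (shorter : String) (longer : String), Dom_get_excessive_letter shorter longer → Spec_get_excessive_letter shorter longer (get_excessive_letter shorter longer)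

-- ===== LEMMAS AND PROOFS =====

-- mathematical core: keep a char iff its budget is exhausted, decrementing as we go
def filterB (f : Char → Int) : List Char → List Char
  | [] => []
  | c :: l => if 0 < f c then filterB (fun x => if x = c then f c - 1 else f x) l
              else c :: filterB f l

theorem filterB_congr (f g : Char → Int) (h : ∀ c, f c = g c) (l : List Char) :
    filterB f l = filterB g l := by
  induction l generalizing f g with
  | nil => rfl
  | cons c l ih =>
      simp only [filterB, h c]
      split
      · exact ih _ _ (fun x => by by_cases hx : x = c <;> simp [hx, h x])
      · rw [ih _ _ h]

theorem filterB_of_nonpos (f : Char → Int) (h : ∀ c, ¬ 0 < f c) (l : List Char) :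
    filterB f l = l := by
  induction l with
  | nil => rfl
  | cons c l ih => simp [filterB, h c, ih]

-- A's loop body
def removeIf (l : List Char) (c : Char) : List Char :=
  if c ∈ l then (PySem.List.remove? l c).getD l else l

theorem removeIf_cons_ne (a c : Char) (h : a ≠ c) (l : List Char) :
    removeIf (a :: l) c = a :: removeIf l c := by
  by_cases hc : c ∈ l
  · simp [removeIf, hc, PySem.List.remove?_cons_of_ne l h,
      PySem.List.remove?_eq_some_erase l c hc]
  · simp [removeIf, hc, Ne.symm h]

theorem filterB_succ (f : Char → Int) (c : Char) (hf : ∀ x, 0 ≤ f x) (l : List Char) :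
    filterB (fun x => if x = c then f x + 1 else f x) l = filterB f (removeIf l c) := by
  induction l generalizing f with
  | nil => simp [removeIf, filterB]
  | cons a l ih =>
      by_cases hac : a = c
      · subst hac
        have h1 : (0:Int) < f a + 1 := by have := hf a; omega
        simp only [filterB, h1, if_pos]
        rw [removeIf]
        simp only [List.mem_cons, true_or, if_pos, PySem.List.remove?_cons_self,
          Option.getD_some]
        exact filterB_congr _ _ (fun x => by by_cases hx : x = a <;> simp [hx]) l
      · rw [removeIf_cons_ne a c hac l]
        simp only [filterB, if_neg hac]
        by_cases ha : 0 < f a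
        · simp only [ha, if_pos]
          have step := ih (fun x => if x = a then f a - 1 else f x)
            (fun x => by
              by_cases hx : x = a
              · simp only [hx, if_pos]; omega
              · simpa [hx] using hf x)
          rw [← step]
          exact filterB_congr _ _ (fun x => by
            by_cases hx : x = a
            · simp [hx, hac]
            · have hca : ¬ c = a := fun hh => hac hh.symm
              by_cases hxc : x = c <;> simp [hx, hxc, hca]) l
        · simp only [ha, if_false]
          rw [ih f hf]

-- A's fold equals filterB with the multiset of counts of `shorter`
theorem foldA_eq_filterB (s l : List Char) :
    s.foldl removeIf l = filterB (fun c => (List.count c s : Int)) l := by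
  induction s generalizing l with
  | nil =>
      simp only [List.foldl_nil]
      exact (filterB_of_nonpos _ (fun c => by simp) l).symm
  | cons c s ih =>
      simp only [List.foldl_cons]
      rw [ih (removeIf l c), ← filterB_succ (fun x => (List.count x s : Int)) c (by simp) l]
      refine filterB_congr _ _ (fun x => ?_) l
      by_cases hx : x = c
      · simp only [hx, if_pos, List.count_cons_self]
        push_cast; ring
      · have hcx : ¬ c = x := fun hh => hx hh.symm
        simp [hx, hcx]

-- B's fold equals filterB with the dict's values
theorem foldB_eq_filterB (l : List Char) (d : PySem.Dict Char Int) (acc : List Char) :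
    (l.foldl (fun (st : PySem.Dict Char Int × List Char) c =>
        let k := st.1.getD c 0
        if k > 0 then (st.1.insert c (k - 1), st.2) else (st.1, st.2 ++ [c]))
      (d, acc)).2 = acc ++ filterB (fun c => d.getD c 0) l := by
  induction l generalizing d acc with
  | nil => simp [filterB]
  | cons c l ih =>
      simp only [List.foldl_cons, filterB]
      by_cases hk : 0 < d.getD c 0
      · simp only [hk, if_pos]
        rw [ih]
        refine congrArg (acc ++ ·) ?_
        exact filterB_congr _ _ (fun x => by
          simp [PySem.Dict.getD_insert]) l
      · simp only [hk, if_false]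
        rw [ih]
        simp

-- ===== VERDICT (by name: the statement is the Claim_ definition above) =====
theorem get_excessive_letter_spec : Claim_equal_get_excessive_letter := by
  intro shorter longer _
  show get_excessive_letter shorter longer = get_excessive_letter_alt shorter longer
  unfold get_excessive_letter get_excessive_letter_alt
  simp only
  rw [foldB_eq_filterB, List.nil_append,
    PySem.Dict.foldl_insert_getD_add_one_eq_counter]
  have hA : (shorter.toList.foldl (fun l2 c =>
      if c ∈ l2 then (PySem.List.remove? l2 c).getD l2 else l2) longer.toList)
      = shorter.toList.foldl removeIf longer.toList := rfl
  rw [hA, foldA_eq_filterB]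
  congr 1
  exact filterB_congr _ _ (fun c => by rw [PySem.Dict.getD_counter]) _
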